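-- pv_equiv track=rewrite | github.com/yetingjian/interface-test | interfaceTest/pyworkspace/SDK/test.py | serial_send_packet_convert
-- ===== SOURCE A (Python) =====
-- def serial_send_packet_convert(data):
--     index = 1
--     # convert_list = data
--     for i in range(1, len(data)):
--         if data[index] == 0xFF:
--             data[index] = 0x7F
--             index += 1
--             data.insert(index, 0xFD)
--         elif data[index] == 0xFE:
--             data[index] = 0x7E
--             index += 1
--             data.insert(index, 0xFD)
--         elif data[index] == 0xFD:
--             data[index] = 0x7D
--             index += 1
--             data.insert(index, 0xFD)
--         index += 1
--     return data
-- ===== SOURCE B (Python) =====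
-- def _esc(b):
--     if b == 0xFF:
--         return [0x7F, 0xFD]
--     if b == 0xFE:
--         return [0x7E, 0xFD]
--     if b == 0xFD:
--         return [0x7D, 0xFD]
--     return [b]
--
--
-- def serial_send_packet_convert(data):
--     tail = []
--     for b in data[1:]:
--         tail += _esc(b)
--     data[1:] = tail
--     return data
-- ===== Notes on version B (the rewrite author's own statement) =====
-- stated objective: simpler
-- what changed: Instead of walking the list with a manually maintained index and inserting escape bytes in place (shifting the tail on every special byte), B maps each byte of data[1:] to its escape sequence in one pass and splices the rebuilt tail back in with a single slice assignment.
import Mathlib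
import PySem

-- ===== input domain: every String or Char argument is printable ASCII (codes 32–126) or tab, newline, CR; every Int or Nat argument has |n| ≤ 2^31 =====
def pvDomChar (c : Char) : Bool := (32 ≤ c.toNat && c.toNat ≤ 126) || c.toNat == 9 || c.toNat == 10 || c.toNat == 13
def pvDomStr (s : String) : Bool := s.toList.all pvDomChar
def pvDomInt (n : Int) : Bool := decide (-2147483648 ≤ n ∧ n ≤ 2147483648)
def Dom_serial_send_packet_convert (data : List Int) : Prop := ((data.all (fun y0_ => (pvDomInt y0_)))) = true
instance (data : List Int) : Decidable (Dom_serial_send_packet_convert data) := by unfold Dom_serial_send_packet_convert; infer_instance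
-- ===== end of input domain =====

-- A walks the list with a manual index and inserts escape bytes in place; B rebuilds the tail
-- in one pass and splices it in (objective: simpler). Both Pythons mutate the argument list in
-- place and return the same object; the equivalence proved here is about the return value.


-- ===== PORT A =====
-- one loop iteration of A's for-loop body (state: the list and the running index)
def pvStepA (st : List Int × Int) : List Int × Int :=
  let d := st.1
  let index := st.2
  match PySem.List.pyGet? d index with
  | none => st  -- unreachable: index stays in range on every iteration (Python would raise IndexError)
  | some v =>
    if v = 0xFF then
      let d := PySem.List.pySetD d index 0x7F
      let index := index + 1
      let d := PySem.List.insert d index 0xFD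
      (d, index + 1)
    else if v = 0xFE then
      let d := PySem.List.pySetD d index 0x7E
      let index := index + 1
      let d := PySem.List.insert d index 0xFD
      (d, index + 1)
    else if v = 0xFD then
      let d := PySem.List.pySetD d index 0x7D
      let index := index + 1
      let d := PySem.List.insert d index 0xFD
      (d, index + 1)
    else
      (d, index + 1)

def serial_send_packet_convert (data : List Int) : List Int :=
  ((PySem.List.pyRange 1 (data.length : Int) 1).foldl (fun st _ => pvStepA st) (data, 1)).1

-- ===== PORT B =====
def pvEsc (b : Int) : List Int :=
  if b = 0xFF then [0x7F, 0xFD]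
  else if b = 0xFE then [0x7E, 0xFD]
  else if b = 0xFD then [0x7D, 0xFD]
  else [b]

def serial_send_packet_convert_alt (data : List Int) : List Int :=
  let tail := (PySem.List.slice data (some 1) none).foldl (fun acc b => acc ++ pvEsc b) []
  data.take 1 ++ tail     -- data[1:] = tail; return data

-- ===== PRECONDITION & SPEC =====
def Spec_serial_send_packet_convert (data : List Int) (out : List Int) : Prop := out = serial_send_packet_convert_alt data
instance (data : List Int) (out : List Int) : Decidable (Spec_serial_send_packet_convert data out) := by unfold Spec_serial_send_packet_convert; infer_instance

-- ===== CLAIM (what is proved, stated in full; the proofs are below) =====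
def Claim_equal_serial_send_packet_convert : Prop := ∀ (data : List Int), Dom_serial_send_packet_convert data → Spec_serial_send_packet_convert data (serial_send_packet_convert data)

-- ===== LEMMAS AND PROOFS =====

theorem pvGet_mid (done rest : List Int) (b : Int) :
    PySem.List.pyGet? (done ++ b :: rest) ((done.length : Int)) = some b := by
  simp

theorem pvInsert_mid (done rest : List Int) (v w : Int) :
    PySem.List.insert (done ++ v :: rest) ((done.length : Int) + 1) w
      = done ++ v :: w :: rest := by
  have h : ((done.length : Int) + 1) = ((done.length + 1 : Nat) : Int) := by push_cast; ring
  rw [h, PySem.List.insert_natCast _ _ _ (by simp)]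
  rw [List.take_append, List.drop_append, List.take_of_length_le (by omega),
    List.drop_of_length_le (by omega)]
  simp

-- A's loop invariant: with the processed prefix `done` (nonempty) already escaped and the index
-- at its end, folding the step once per remaining element escapes the rest.
theorem pvLoopA (rest : List Int) (l : List Int) (done : List Int)
    (hl : l.length = rest.length) :
    l.foldl (fun st _ => pvStepA st) (done ++ rest, (done.length : Int))
      = (done ++ rest.flatMap pvEsc, ((done ++ rest.flatMap pvEsc).length : Int)) := by
  induction rest generalizing l done with
  | nil =>
    have : l = [] := List.eq_nil_of_length_eq_zero hl
    simp [this]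
  | cons b rest ih =>
    match l, hl with
    | x :: l, hl =>
      have hl' : l.length = rest.length := by simpa using hl
      simp only [List.foldl_cons]
      by_cases h255 : b = 0xFF
      · have hstep : pvStepA (done ++ b :: rest, (done.length : Int))
            = (done ++ 0x7F :: 0xFD :: rest, (done.length : Int) + 2) := by
          simp only [pvStepA, pvGet_mid, h255]
          norm_num
          exact ⟨pvInsert_mid done rest 127 253, by ring⟩
        rw [hstep]
        have := ih l (done ++ [0x7F, 0xFD]) hl'
        simp only [List.append_assoc, List.cons_append, List.nil_append] at this
        have hlen : ((done ++ [(0x7F : Int), 0xFD]).length : Int) = (done.length : Int) + 2 := by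
          simp
        rw [← hlen, this]
        simp [pvEsc, h255]
      · by_cases h254 : b = 0xFE
        · have hstep : pvStepA (done ++ b :: rest, (done.length : Int))
              = (done ++ 0x7E :: 0xFD :: rest, (done.length : Int) + 2) := by
            simp only [pvStepA, pvGet_mid, h254]
            norm_num
            exact ⟨pvInsert_mid done rest 126 253, by ring⟩
          rw [hstep]
          have := ih l (done ++ [0x7E, 0xFD]) hl'
          simp only [List.append_assoc, List.cons_append, List.nil_append] at this
          have hlen : ((done ++ [(0x7E : Int), 0xFD]).length : Int) = (done.length : Int) + 2 := by
            simp
          rw [← hlen, this]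
          simp [pvEsc, h254]
        · by_cases h253 : b = 0xFD
          · have hstep : pvStepA (done ++ b :: rest, (done.length : Int))
                = (done ++ 0x7D :: 0xFD :: rest, (done.length : Int) + 2) := by
              simp only [pvStepA, pvGet_mid, h253]
              norm_num
              exact ⟨pvInsert_mid done rest 125 253, by ring⟩
            rw [hstep]
            have := ih l (done ++ [0x7D, 0xFD]) hl'
            simp only [List.append_assoc, List.cons_append, List.nil_append] at this
            have hlen : ((done ++ [(0x7D : Int), 0xFD]).length : Int) = (done.length : Int) + 2 := by
              simp
            rw [← hlen, this]
            simp [pvEsc, h253]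
          · have hstep : pvStepA (done ++ b :: rest, (done.length : Int))
                = (done ++ b :: rest, (done.length : Int) + 1) := by
              simp [pvStepA, h255, h254, h253]
            rw [hstep]
            have := ih l (done ++ [b]) hl'
            simp only [List.append_assoc, List.cons_append, List.nil_append] at this
            have hlen : ((done ++ [b]).length : Int) = (done.length : Int) + 1 := by
              simp
            rw [← hlen, this]
            simp [pvEsc, h255, h254, h253]

-- ===== VERDICT (by name: the statement is the Claim_ definition above) =====
theorem serial_send_packet_convert_spec : Claim_equal_serial_send_packet_convert := by
  intro data _
  unfold Spec_serial_send_packet_convert serial_send_packet_convert serial_send_packet_convert_alt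
  rw [PySem.List.slice_from_one, PySem.List.foldl_append_eq_flatMap]
  cases data with
  | nil => simp [PySem.List.pyRange_one_eq_nil]
  | cons h t =>
    have hlen : (PySem.List.pyRange 1 ((h :: t).length : Int) 1).length = t.length := by
      rw [PySem.List.length_pyRange_one]; simp
    have := pvLoopA t (PySem.List.pyRange 1 ((h :: t).length : Int) 1) [h] hlen
    simp only [List.singleton_append, List.length_singleton, Nat.cast_one] at this
    rw [this]
    simp
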